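-- pv_equiv track=rewrite | github.com/MicrobialDarkMatter/Fishnchips_basecaller | src/utils/base_converter.py | convert_to_ctc_base_string
-- ===== SOURCE A (Python) =====
-- ctc_base_map = {
--     1: 'A',
--     2: 'C',
--     3: 'G',
--     4: 'T',
--     5: '-'
-- }
--
-- def convert_to_ctc_base_string(int_base_list, collapse=True):
--     base_string = ''
--     for int_base_token in int_base_list:
--         str_base_token = ctc_base_map[int_base_token]
--         base_string += str_base_token
--     if collapse:
--         collapsed_base_string = ''
--         current_base = ''
--         for i,base in enumerate(base_string):
--             if base in 'ACTG' and current_base != base: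
--                 collapsed_base_string += base
--             current_base = base
--         return collapsed_base_string
--     return base_string
-- ===== SOURCE B (Python) =====
-- ctc_base_map = {
--     1: 'A',
--     2: 'C',
--     3: 'G',
--     4: 'T',
--     5: '-'
-- }
--
-- def convert_to_ctc_base_string(int_base_list, collapse=True):
--     base_string = ''.join(ctc_base_map[t] for t in int_base_list)
--     if not collapse:
--         return base_string
--     # run-segmentation: emit the head of each maximal run of equal chars if it is a base
--     out = []
--     i, n = 0, len(base_string)
--     while i < n:
--         b = base_string[i]
--         j = i + 1
--         while j < n and base_string[j] == b:
--             j += 1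
--         if b in 'ACTG':
--             out.append(b)
--         i = j
--     return ''.join(out)
-- ===== Notes on version B (the rewrite author's own statement) =====
-- stated objective: alternative
-- what changed: A builds the full mapped string then runs a char-by-char state machine with a previous-char register; B maps and joins in one expression and collapses by run-segmentation (two-index scan over maximal runs of equal chars, emitting each run head that is a base), with no prev-state register.
import Mathlib
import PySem

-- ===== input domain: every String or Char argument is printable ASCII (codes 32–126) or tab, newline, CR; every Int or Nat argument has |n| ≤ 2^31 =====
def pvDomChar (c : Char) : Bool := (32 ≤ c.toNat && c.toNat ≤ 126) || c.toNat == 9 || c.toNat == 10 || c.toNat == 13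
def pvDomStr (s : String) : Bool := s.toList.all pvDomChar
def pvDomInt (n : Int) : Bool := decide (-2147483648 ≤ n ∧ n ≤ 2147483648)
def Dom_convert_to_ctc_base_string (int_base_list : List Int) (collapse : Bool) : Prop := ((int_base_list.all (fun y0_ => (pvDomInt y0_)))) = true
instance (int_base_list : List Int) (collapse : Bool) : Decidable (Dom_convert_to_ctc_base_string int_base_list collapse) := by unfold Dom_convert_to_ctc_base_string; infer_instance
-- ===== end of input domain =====

-- B collapses by run-segmentation instead of A's char-by-char prev-register state machine; same cost, alternative decomposition.
-- Python strings are represented as List Char (PySem.Chars style), wrapped with String.mk at the end.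

-- ===== PORT A =====
def ctc_base_map : PySem.Dict Int String :=
  PySem.Dict.ofList [(1, "A"), (2, "C"), (3, "G"), (4, "T"), (5, "-")]

-- ctc_base_map[t]; a missing key is a Python KeyError, excluded by Pre_ (the "" default is never reached inside Pre_)
def convert_to_ctc_base_string (int_base_list : List Int) (collapse : Bool) : String :=
  let base_string : List Char :=
    int_base_list.foldl (fun acc t => acc ++ (PySem.Dict.getD ctc_base_map t "").toList) []
  if collapse then
    let st :=
      (PySem.List.enumerate base_string 0).foldl
        (fun (st : List Char × List Char) ib =>
          let base := ib.2
          let collapsed :=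
            if ("ACTG".toList.contains base) ∧ st.2 ≠ [base] then st.1 ++ [base] else st.1
          (collapsed, [base])) ([], [])
    String.mk st.1
  else String.mk base_string

-- ===== PORT B =====
-- inner while loop of Source B: skip the rest of the current run (bases[j] == b)
def pvRunsCollapse : List Char → List Char
  | [] => []
  | b :: cs =>
      (if "ACTG".toList.contains b then [b] else []) ++ pvRunsCollapse (cs.dropWhile (· == b))
termination_by l => l.length
decreasing_by
  simpa using Nat.lt_succ_of_le (List.length_dropWhile_le (· == b) cs)

def convert_to_ctc_base_string_alt (int_base_list : List Int) (collapse : Bool) : String :=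
  let base_string : List Char :=
    (int_base_list.map (fun t => PySem.Dict.getD ctc_base_map t "")).flatMap String.toList
  if !collapse then String.mk base_string
  else String.mk (pvRunsCollapse base_string)

-- ===== PRECONDITION & SPEC =====
-- Pre_ excludes exactly the inputs on which A raises KeyError (a token outside 1..5); B raises there too.
def Pre_convert_to_ctc_base_string (int_base_list : List Int) (collapse : Bool) : Prop :=
  ∀ t ∈ int_base_list, 1 ≤ t ∧ t ≤ 5
instance (int_base_list : List Int) (collapse : Bool) : Decidable (Pre_convert_to_ctc_base_string int_base_list collapse) := by
  unfold Pre_convert_to_ctc_base_string; infer_instance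

def pvWitness_convert_to_ctc_base_string : List Int × Bool := ([1, 1, 5, 1, 4, 4, 2], true)

def Spec_convert_to_ctc_base_string (int_base_list : List Int) (collapse : Bool) (out : String) : Prop := out = convert_to_ctc_base_string_alt int_base_list collapse
instance (int_base_list : List Int) (collapse : Bool) (out : String) : Decidable (Spec_convert_to_ctc_base_string int_base_list collapse out) := by unfold Spec_convert_to_ctc_base_string; infer_instance

-- ===== CLAIM (what is proved, stated in full; the proofs are below) =====
def Claim_equal_convert_to_ctc_base_string : Prop := ∀ (int_base_list : List Int) (collapse : Bool), Dom_convert_to_ctc_base_string int_base_list collapse → Pre_convert_to_ctc_base_string int_base_list collapse → Spec_convert_to_ctc_base_string int_base_list collapse (convert_to_ctc_base_string int_base_list collapse)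

-- ===== LEMMAS AND PROOFS =====

-- reference collapse: emit c when it is a base and differs from the previous char
def pvCollapseRec (prev : List Char) : List Char → List Char
  | [] => []
  | c :: cs => (if "ACTG".toList.contains c ∧ prev ≠ [c] then [c] else []) ++ pvCollapseRec [c] cs

theorem pvA_fold_eq (cs : List Char) : ∀ (acc prev : List Char) (s : Int),
    ((PySem.List.enumerate cs s).foldl
      (fun (st : List Char × List Char) ib =>
        let base := ib.2
        let collapsed :=
          if ("ACTG".toList.contains base) ∧ st.2 ≠ [base] then st.1 ++ [base] else st.1
        (collapsed, [base])) (acc, prev)).1 = acc ++ pvCollapseRec prev cs := by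
  induction cs with
  | nil => intro acc prev s; simp [PySem.List.enumerate_nil, pvCollapseRec]
  | cons c cs ih =>
    intro acc prev s
    rw [PySem.List.enumerate_cons, List.foldl_cons]
    simp only [pvCollapseRec]
    refine (ih _ [c] (s + 1)).trans ?_
    split_ifs <;> simp

theorem pvCollapseRec_skip (cs : List Char) (c : Char) :
    pvCollapseRec [c] cs = pvCollapseRec [c] (cs.dropWhile (· == c)) := by
  induction cs with
  | nil => rfl
  | cons d cs ih =>
    by_cases h : d = c
    · subst h
      simp only [pvCollapseRec, List.dropWhile_cons, BEq.rfl]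
      simpa using ih
    · simp [h]

theorem pvHead_dropWhile {α : Type} (p : α → Bool) (l : List α) :
    ∀ d, (l.dropWhile p).head? = some d → p d = false := by
  induction l with
  | nil => intro d h; simp [List.dropWhile] at h
  | cons a l ih =>
    intro d h
    by_cases hp : p a = true
    · exact ih d (by simpa [List.dropWhile_cons, hp] using h)
    · rw [List.dropWhile_cons, if_neg hp] at h
      simp only [List.head?_cons, Option.some.injEq] at h
      subst h
      simpa using hp

theorem pvCollapseRec_prev_irrel (l : List Char) (p : List Char)
    (h : ∀ d, l.head? = some d → p ≠ [d]) :
    pvCollapseRec p l = pvCollapseRec [] l := by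
  cases l with
  | nil => rfl
  | cons d rest =>
    have hp : p ≠ [d] := h d rfl
    simp [pvCollapseRec, hp]

theorem pvCollapseRec_eq_runs (l : List Char) : pvCollapseRec [] l = pvRunsCollapse l := by
  induction l using pvRunsCollapse.induct with
  | case1 => simp [pvCollapseRec, pvRunsCollapse]
  | case2 b cs ih =>
    rw [pvRunsCollapse]
    simp only [pvCollapseRec]
    rw [pvCollapseRec_skip cs b,
        pvCollapseRec_prev_irrel _ _ (by
          intro d hd he
          have hne := pvHead_dropWhile (· == b) cs d hd
          simp only [List.cons.injEq, and_true] at he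
          simp [he] at hne),
        ih]
    congr 1
    by_cases hb : "ACTG".toList.contains b <;> simp

-- ===== VERDICT (by name: the statement is the Claim_ definition above) =====
theorem convert_to_ctc_base_string_spec : Claim_equal_convert_to_ctc_base_string := by
  intro l collapse _ _
  unfold Spec_convert_to_ctc_base_string convert_to_ctc_base_string convert_to_ctc_base_string_alt
  have hbase :
      l.foldl (fun acc t => acc ++ (PySem.Dict.getD ctc_base_map t "").toList) ([] : List Char)
        = (l.map (fun t => PySem.Dict.getD ctc_base_map t "")).flatMap String.toList := by
    rw [PySem.List.foldl_append_eq_flatMap]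
    simp [List.flatMap_map]
  cases collapse with
  | false => simp [hbase]
  | true =>
    simp only [Bool.not_true, if_neg (by simp : ¬ false = true)]
    rw [if_pos trivial, pvA_fold_eq, hbase, List.nil_append, pvCollapseRec_eq_runs]
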